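-- pv_equiv track=rewrite | github.com/pirl-unc/mhcseqs | mhcseqs/pipeline.py | _candidate_tokens
-- ===== SOURCE A (Python) =====
-- from typing import Dict, Iterator, List, Optional, Tuple
--
-- def _candidate_tokens(header: str) -> List[str]:
--     """Score and rank tokens from a FASTA header for allele parsing."""
--     cleaned = header.replace("|", " ").replace(";", " ")
--     tokens = [t.strip() for t in cleaned.split() if t.strip()]
--     if not tokens:
--         return []
--     scored = []
--     for tok in tokens:
--         score = 0
--         if "*" in tok:
--             score += 3
--         if tok.upper().startswith("HLA-"):
--             score += 2
--         if tok.upper().startswith("H-2"):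
--             score += 2
--         if tok.upper().startswith("MAMU"):
--             score += 2
--         if ":" in tok:
--             score += 1
--         scored.append((score, tok))
--     scored.sort(key=lambda x: x[0], reverse=True)
--     return [tok for _, tok in scored]
-- ===== SOURCE B (Python) =====
-- from typing import List
--
-- def _score(tok: str) -> int:
--     u = tok.upper()
--     return (3 * ("*" in tok)
--             + 2 * u.startswith("HLA-")
--             + 2 * u.startswith("H-2")
--             + 2 * u.startswith("MAMU")
--             + (":" in tok))
--
-- def _candidate_tokens(header: str) -> List[str]:
--     """Score and rank tokens from a FASTA header for allele parsing.
--
--     Counting-sort style: no (score, token) pairs and no comparison sort;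
--     for each possible score from 9 down to 0 emit, in original order, the
--     tokens with that score.  Stability of A's sort is matched because each
--     filtering pass keeps the original order."""
--     cleaned = header.replace("|", " ").replace(";", " ")
--     tokens = [t.strip() for t in cleaned.split() if t.strip()]
--     return [tok for s in range(9, -1, -1) for tok in tokens if _score(tok) == s]
-- ===== Notes on version B (the rewrite author's own statement) =====
-- stated objective: alternative
-- what changed: Removes the (score, token) pair list and the stable comparison sort entirely: B makes one filtering pass per possible score, from 9 down to 0, emitting the tokens with that score in original order (a counting-sort style selection).
import Mathlib
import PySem

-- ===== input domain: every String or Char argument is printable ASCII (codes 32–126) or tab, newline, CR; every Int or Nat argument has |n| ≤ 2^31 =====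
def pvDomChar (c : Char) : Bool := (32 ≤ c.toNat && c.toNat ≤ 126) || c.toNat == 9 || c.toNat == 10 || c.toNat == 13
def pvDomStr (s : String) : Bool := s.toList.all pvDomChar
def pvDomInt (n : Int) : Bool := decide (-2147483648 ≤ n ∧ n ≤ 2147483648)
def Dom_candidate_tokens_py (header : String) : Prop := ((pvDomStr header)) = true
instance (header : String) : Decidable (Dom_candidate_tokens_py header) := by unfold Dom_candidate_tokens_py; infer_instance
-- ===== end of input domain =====

-- B drops the (score, token) pair list and the stable comparison sort: for each possible
-- score from 9 down to 0 it emits, in one filtering pass, the tokens with that score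
-- (objective: alternative, counting-sort style selection).

-- ===== PORT A =====
-- the per-token score cascade of A's loop body (score = 0; score += … in order)
def pvScoreA (tok : String) : Int :=
  let score : Int := 0
  let score := if PySem.Str.isIn "*" tok then score + 3 else score
  let score := if PySem.Str.startswith (PySem.Str.upper tok) "HLA-" then score + 2 else score
  let score := if PySem.Str.startswith (PySem.Str.upper tok) "H-2" then score + 2 else score
  let score := if PySem.Str.startswith (PySem.Str.upper tok) "MAMU" then score + 2 else score
  let score := if PySem.Str.isIn ":" tok then score + 1 else score
  score

def candidate_tokens_py (header : String) : List String :=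
  let cleaned := PySem.Str.replace (PySem.Str.replace header "|" " ") ";" " "
  let tokens := ((PySem.Str.split₀ cleaned).filter
      (fun t => PySem.Str.strip t != "")).map (fun t => PySem.Str.strip t)
  if tokens.isEmpty then []
  else
    let scored := tokens.foldl (fun acc tok => acc ++ [(pvScoreA tok, tok)])
      ([] : List (Int × String))
    let scored := PySem.List.sorted scored (fun x => x.1) true
    scored.map (fun x => x.2)

-- ===== PORT B =====
-- Source B's _score: one arithmetic sum of weighted boolean tests (3*(..) + 2*(..) + …)
def pvScoreB (tok : String) : Int :=
  let u := PySem.Str.upper tok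
  3 * (if PySem.Str.isIn "*" tok then (1:Int) else 0)
    + 2 * (if PySem.Str.startswith u "HLA-" then (1:Int) else 0)
    + 2 * (if PySem.Str.startswith u "H-2" then (1:Int) else 0)
    + 2 * (if PySem.Str.startswith u "MAMU" then (1:Int) else 0)
    + (if PySem.Str.isIn ":" tok then (1:Int) else 0)

-- [tok for s in range(9, -1, -1) for tok in tokens if _score(tok) == s]
def candidate_tokens_py_alt (header : String) : List String :=
  let cleaned := PySem.Str.replace (PySem.Str.replace header "|" " ") ";" " "
  let tokens := ((PySem.Str.split₀ cleaned).filter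
      (fun t => PySem.Str.strip t != "")).map (fun t => PySem.Str.strip t)
  (PySem.List.pyRange 9 (-1) (-1)).flatMap
    (fun s => tokens.filter (fun tok => pvScoreB tok == s))

-- ===== PRECONDITION & SPEC =====
def Spec_candidate_tokens_py (header : String) (out : List String) : Prop := out = candidate_tokens_py_alt header
instance (header : String) (out : List String) : Decidable (Spec_candidate_tokens_py header out) := by unfold Spec_candidate_tokens_py; infer_instance

-- ===== CLAIM (what is proved, stated in full; the proofs are below) =====
def Claim_equal_candidate_tokens_py : Prop := ∀ (header : String), Dom_candidate_tokens_py header → Spec_candidate_tokens_py header (candidate_tokens_py header)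

-- ===== LEMMAS AND PROOFS =====

theorem pvScoreB_eq (t : String) : pvScoreB t = pvScoreA t := by
  simp only [pvScoreB, pvScoreA]
  split_ifs <;> norm_num

theorem pvScoreA_nonneg (t : String) : 0 ≤ pvScoreA t := by
  simp only [pvScoreA]; split_ifs <;> omega

-- two of the three allele prefixes can never hold at once (they differ within char 0..1)
theorem pvNoPrefix2 (u : String) (p q : List Char) (hne : p.take 2 ≠ q.take 2)
    (hp : 2 ≤ p.length) (hq : 2 ≤ q.length)
    (h1 : p <+: u.toList) (h2 : q <+: u.toList) : False := by
  rcases h1 with ⟨t1, e1⟩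
  rcases h2 with ⟨t2, e2⟩
  apply hne
  have e : p ++ t1 = q ++ t2 := by rw [e1, e2]
  calc p.take 2 = (p ++ t1).take 2 := by rw [List.take_append_of_le_length hp]
    _ = (q ++ t2).take 2 := by rw [e]
    _ = q.take 2 := by rw [List.take_append_of_le_length hq]

theorem pvSW (u p : String) (h : PySem.Str.startswith u p = true) :
    p.toList <+: u.toList := by
  rw [PySem.Str.startswith_eq, PySem.Chars.startswith_iff] at h
  exact h

theorem pvPrefixSum_le (u : String) :
    (if PySem.Str.startswith u "HLA-" then (2:Int) else 0)
      + (if PySem.Str.startswith u "H-2" then (2:Int) else 0)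
      + (if PySem.Str.startswith u "MAMU" then (2:Int) else 0) ≤ 2 := by
  by_cases h1 : PySem.Str.startswith u "HLA-" = true
  · by_cases h2 : PySem.Str.startswith u "H-2" = true
    · exact (pvNoPrefix2 u "HLA-".toList "H-2".toList (by decide) (by decide) (by decide)
        (pvSW u _ h1) (pvSW u _ h2)).elim
    · by_cases h3 : PySem.Str.startswith u "MAMU" = true
      · exact (pvNoPrefix2 u "HLA-".toList "MAMU".toList (by decide) (by decide) (by decide)
          (pvSW u _ h1) (pvSW u _ h3)).elim
      · simp at h1 h2 h3
        simp [h1, h2, h3]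
  · by_cases h2 : PySem.Str.startswith u "H-2" = true
    · by_cases h3 : PySem.Str.startswith u "MAMU" = true
      · exact (pvNoPrefix2 u "H-2".toList "MAMU".toList (by decide) (by decide) (by decide)
          (pvSW u _ h2) (pvSW u _ h3)).elim
      · simp at h1 h2 h3
        simp [h1, h2, h3]
    · by_cases h3 : PySem.Str.startswith u "MAMU" = true
      · simp at h1 h2 h3
        simp [h1, h2, h3]
      · simp at h1 h2 h3
        simp [h1, h2, h3]

theorem pvScoreA_le_nine (t : String) : pvScoreA t ≤ 9 := by
  have h := pvPrefixSum_le (PySem.Str.upper t)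
  revert h
  simp only [pvScoreA]
  split_ifs <;> intro h <;> omega

-- the buckets, concatenated from level n down to 0
def pvDescCat : Nat → List (Int × String) → List (Int × String)
  | 0, ps => ps.filter (fun p => decide (p.1 = (0 : Int)))
  | (n+1), ps => ps.filter (fun p => decide (p.1 = ((n+1 : Nat) : Int))) ++ pvDescCat n ps

theorem pvDescCat_nil (n : Nat) : pvDescCat n [] = [] := by
  induction n with
  | zero => rfl
  | succ n ih => simp [pvDescCat, ih]

theorem mem_pvDescCat {n : Nat} {ps : List (Int × String)} {y : Int × String}
    (h : y ∈ pvDescCat n ps) : y ∈ ps ∧ y.1 ≤ (n : Int) := by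
  induction n with
  | zero => simp [pvDescCat] at h; exact ⟨h.1, le_of_eq h.2⟩
  | succ n ih =>
    simp only [pvDescCat, List.mem_append] at h
    rcases h with h | h
    · simp at h; exact ⟨h.1, le_of_eq h.2⟩
    · rcases ih h with ⟨h1, h2⟩
      refine ⟨h1, by omega⟩

theorem insertBy_append_skip {α : Type} (before : α → α → Bool) (x : α)
    (A B : List α) (hA : ∀ y ∈ A, before x y = false) :
    PySem.List.insertBy before x (A ++ B) = A ++ PySem.List.insertBy before x B := by
  induction A with
  | nil => rfl
  | cons a A ih =>
    have ha : before x a = false := hA a (by simp)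
    simp [PySem.List.insertBy, ha, ih (fun y hy => hA y (by simp [hy]))]

theorem insertBy_of_forall_before {α : Type} (before : α → α → Bool) (x : α)
    (B : List α) (hB : ∀ y ∈ B, before x y = true) :
    PySem.List.insertBy before x B = x :: B := by
  cases B with
  | nil => rfl
  | cons b B => simp [PySem.List.insertBy, hB b (by simp)]

theorem pvDescCat_append_of_gt (n : Nat) (ps : List (Int × String)) (p : Int × String)
    (h : (n : Int) < p.1) : pvDescCat n (ps ++ [p]) = pvDescCat n ps := by
  induction n with
  | zero => simp [pvDescCat]; omega
  | succ n ih =>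
    have : (n : Int) < p.1 := by push_cast at h ⊢; omega
    simp only [pvDescCat, List.filter_append, ih this]
    have h2 : ¬ (p.1 = (n : Int) + 1) := by push_cast at h; omega
    simp [h2]

-- inserting one element into the bucket concatenation appends it to its bucket
theorem insertBy_pvDescCat (n : Nat) (ps : List (Int × String)) (p : Int × String)
    (h0 : 0 ≤ p.1) (hn : p.1 ≤ (n : Int)) :
    PySem.List.insertBy (fun a b => decide (b.1 < a.1)) p (pvDescCat n ps)
      = pvDescCat n (ps ++ [p]) := by
  induction n with
  | zero =>
    have hp : p.1 = (0 : Int) := by omega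
    simp only [pvDescCat, List.filter_append]
    rw [PySem.List.insertBy_of_forall_not_before]
    · simp [hp]
    · intro y hy
      simp at hy
      simp [hy.2, hp]
  | succ n ih =>
    by_cases hp : p.1 = ((n+1 : Nat) : Int)
    · simp only [pvDescCat, List.filter_append]
      rw [insertBy_append_skip]
      · rw [insertBy_of_forall_before]
        · rw [pvDescCat_append_of_gt n ps p (by push_cast at hp ⊢; omega)]
          simp [hp]
        · intro y hy
          have := mem_pvDescCat hy
          simp only [decide_eq_true_eq]
          push_cast at hp
          omega
      · intro y hy
        simp at hy
        simp [hy.2, hp]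
    · have hle : p.1 ≤ (n : Int) := by push_cast at hn hp ⊢; omega
      simp only [pvDescCat, List.filter_append]
      rw [insertBy_append_skip]
      · rw [ih hle]
        have hp2 : ¬ (p.1 = (n : Int) + 1) := by push_cast at hp; omega
        simp [hp2]
      · intro y hy
        simp at hy
        simp only [decide_eq_false_iff_not, not_lt, hy.2]
        omega

-- A's stable descending sort of the (score, token) pairs IS the bucket concatenation
theorem sorted_eq_pvDescCat (ts : List String) :
    PySem.List.sorted (ts.map (fun t => (pvScoreA t, t))) (fun x => x.1) true
      = pvDescCat 9 (ts.map (fun t => (pvScoreA t, t))) := by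
  rw [PySem.List.sorted_rev_eq_foldl_insertBy]
  induction ts using List.reverseRecOn with
  | nil => simp [pvDescCat_nil]
  | append_singleton ts t ih =>
    rw [List.map_append, List.foldl_append, ih]
    simpa using insertBy_pvDescCat 9 (ts.map (fun t => (pvScoreA t, t))) (pvScoreA t, t)
      (pvScoreA_nonneg t) (by exact_mod_cast pvScoreA_le_nine t)

-- one level: the pair bucket, projected to tokens, is B's filtering pass at that score
theorem pvLevel_eq (c : Int) (ts : List String) :
    ((ts.map (fun t => (pvScoreA t, t))).filter (fun p => decide (p.1 = c))).map (fun x => x.2)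
      = ts.filter (fun tok => pvScoreB tok == c) := by
  induction ts with
  | nil => rfl
  | cons t ts ih =>
    by_cases he : pvScoreA t = c <;>
      simp [pvScoreB_eq, he, ih]

-- the whole bucket concatenation, projected to tokens, is B's countdown of filters
theorem pvDescCat_map_snd (n : Nat) (ts : List String) :
    (pvDescCat n (ts.map (fun t => (pvScoreA t, t)))).map (fun x => x.2)
      = (PySem.List.pyRange (n : Int) (-1) (-1)).flatMap
          (fun s => ts.filter (fun tok => pvScoreB tok == s)) := by
  induction n with
  | zero =>
    rw [PySem.List.pyRange_neg_one_cons (by omega), PySem.List.pyRange_neg_one_eq_nil (by omega)]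
    simp [pvDescCat, pvLevel_eq]
  | succ n ih =>
    rw [PySem.List.pyRange_neg_one_cons (by push_cast; omega)]
    simp only [pvDescCat, List.map_append, List.flatMap_cons]
    rw [pvLevel_eq]
    have h1 : (((n : Nat) + 1 : Nat) : Int) - 1 = ((n : Nat) : Int) := by push_cast; omega
    rw [h1, ih]

-- both post-tokenization pipelines agree, as a function of the token list
theorem pvPipeline_eq (ts : List String) :
    (if ts.isEmpty then []
     else ((PySem.List.sorted (ts.foldl (fun acc tok => acc ++ [(pvScoreA tok, tok)])
        ([] : List (Int × String))) (fun x => x.1) true).map (fun x => x.2)))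
    = (PySem.List.pyRange 9 (-1) (-1)).flatMap
        (fun s => ts.filter (fun tok => pvScoreB tok == s)) := by
  by_cases h : ts.isEmpty
  · rw [List.isEmpty_iff] at h
    subst h
    simp
  · rw [if_neg h]
    rw [PySem.List.foldl_append_singleton_eq_map]
    simp only [List.nil_append]
    rw [sorted_eq_pvDescCat]
    have h9 : (9 : Int) = ((9 : Nat) : Int) := by norm_num
    rw [h9, ← pvDescCat_map_snd 9 ts]

-- ===== VERDICT (by name: the statement is the Claim_ definition above) =====
theorem candidate_tokens_py_spec : Claim_equal_candidate_tokens_py := by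
  intro header _
  unfold Spec_candidate_tokens_py
  simp only [candidate_tokens_py, candidate_tokens_py_alt]
  exact pvPipeline_eq _
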